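-- pv_equiv track=rewrite | github.com/pantzon/advent-of-code | 2020/day11.py | IterateP1
-- ===== SOURCE A (Python) =====
-- SEAT_DIFFS = [(-1, -1), (-1, 0), (-1, 1), (0, 1), (1, 1), (1, 0), (1, -1), (0, -1)]
--
-- def IterateP1(seatmap: list[list[str]]) -> tuple[list[list[str]], bool, int]:
--     occupied = 0
--     changed = False
--     newMap: list[list[str]] = []
--     for y, r in enumerate(seatmap):
--         newMap.append([])
--         for x, seat in enumerate(r):
--             newSeat = seat
--             if seat != ".":
--                 occupiedNeighbors = 0
--                 for dx, dy in SEAT_DIFFS: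
--                     if IsTaken(seatmap, x + dx, y + dy):
--                         occupiedNeighbors += 1
--                 if seat == "L" and occupiedNeighbors == 0:
--                     changed = True
--                     newSeat = "#"
--                     occupied += 1
--                 elif seat == "#" and occupiedNeighbors >= 4:
--                     changed = True
--                     newSeat = "L"
--                 elif seat == "#":
--                     occupied += 1
--             newMap[y].append(newSeat)
--     return (newMap, changed, occupied)
--
-- def IsTaken(seatmap: list[list[str]], x: int, y: int) -> bool | None:
--     if 0 <= y and y < len(seatmap) and 0 <= x and x < len(seatmap[y]):
--         if seatmap[y][x] == ".":
--             return None
--         elif seatmap[y][x] == "L":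
--             return False
--         else:
--             return True
--     else:
--         # Leaving the boundaries counts as an empty seat.
--         return False
-- ===== SOURCE B (Python) =====
-- SEAT_DIFFS = [(-1, -1), (-1, 0), (-1, 1), (0, 1), (1, 1), (1, 0), (1, -1), (0, -1)]
--
-- def IterateP1(seatmap: list[list[str]]) -> tuple[list[list[str]], bool, int]:
--     # Inverted counting: every taken seat scatters +1 into a dict keyed by each
--     # neighbor coordinate (no bounds checks needed); cells then just read the dict.
--     counts: dict[tuple[int, int], int] = {}
--     for y, row in enumerate(seatmap):
--         for x, c in enumerate(row):
--             if c != "." and c != "L":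
--                 for dx, dy in SEAT_DIFFS:
--                     key = (x + dx, y + dy)
--                     counts[key] = counts.get(key, 0) + 1
--     newMap = [
--         ["#" if c == "L" and counts.get((x, y), 0) == 0 else
--          "L" if c == "#" and counts.get((x, y), 0) >= 4 else c
--          for x, c in enumerate(row)]
--         for y, row in enumerate(seatmap)
--     ]
--     occupied = sum(row.count("#") for row in newMap)
--     changed = newMap != seatmap
--     return (newMap, changed, occupied)
-- ===== Notes on version B (the rewrite author's own statement) =====
-- stated objective: alternative
-- what changed: B inverts the neighbor counting: instead of each cell gathering its 8 neighbors through the bounds-checking tri-state IsTaken helper, every taken seat scatters +1 into a dict keyed by each neighbor coordinate (no bounds checks at all), and the rule pass just reads the dict; occupied and changed are then derived by a '#'-count and a whole-grid comparison.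
import Mathlib
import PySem

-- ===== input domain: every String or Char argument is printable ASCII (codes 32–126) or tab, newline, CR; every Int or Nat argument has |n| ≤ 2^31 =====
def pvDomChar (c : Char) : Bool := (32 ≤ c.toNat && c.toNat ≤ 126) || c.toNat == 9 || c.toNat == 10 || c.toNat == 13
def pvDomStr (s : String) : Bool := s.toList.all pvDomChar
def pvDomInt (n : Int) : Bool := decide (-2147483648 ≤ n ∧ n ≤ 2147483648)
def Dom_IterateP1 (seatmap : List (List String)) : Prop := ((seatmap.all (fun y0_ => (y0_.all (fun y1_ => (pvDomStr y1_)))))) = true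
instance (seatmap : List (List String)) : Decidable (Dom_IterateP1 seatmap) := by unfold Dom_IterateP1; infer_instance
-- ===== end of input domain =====

-- B inverts the neighbor counting: each taken seat scatters +1 into a dict keyed by its neighbor
-- coordinates (no bounds checks, no IsTaken helper); the rule pass reads that dict, and occupied /
-- changed are derived by separate passes (objective: alternative algorithm, same cost).

-- ===== PORT A =====
def SEAT_DIFFS : List (Int × Int) := [(-1,-1),(-1,0),(-1,1),(0,1),(1,1),(1,0),(1,-1),(0,-1)]

def IsTaken (seatmap : List (List String)) (x y : Int) : Option Bool :=
  if 0 ≤ y ∧ y < (seatmap.length : Int) ∧ 0 ≤ x ∧ x < (((PySem.List.pyGet? seatmap y).getD []).length : Int) then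
    -- indices are in range here, so pyGet? ….getD is exactly Python's seatmap[y][x]
    let c := (PySem.List.pyGet? ((PySem.List.pyGet? seatmap y).getD []) x).getD ""
    if c = "." then none
    else if c = "L" then some false
    else some true
  else
    some false

def IterateP1 (seatmap : List (List String)) : List (List String) × Bool × Int :=
  let res := (PySem.List.enumerate seatmap).foldl
    (fun (st : Int × Bool × List (List String)) (yr : Int × List String) =>
      let inner := (PySem.List.enumerate yr.2).foldl
        (fun (st2 : Int × Bool × List String) (xseat : Int × String) =>
          if xseat.2 ≠ "." then
            let occupiedNeighbors := SEAT_DIFFS.foldl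
              (fun acc d => if IsTaken seatmap (xseat.1 + d.1) (yr.1 + d.2) = some true then acc + 1 else acc)
              (0 : Int)
            if xseat.2 = "L" ∧ occupiedNeighbors = 0 then (st2.1 + 1, true, st2.2.2 ++ ["#"])
            else if xseat.2 = "#" ∧ occupiedNeighbors ≥ 4 then (st2.1, true, st2.2.2 ++ ["L"])
            else if xseat.2 = "#" then (st2.1 + 1, st2.2.1, st2.2.2 ++ [xseat.2])
            else (st2.1, st2.2.1, st2.2.2 ++ [xseat.2])
          else (st2.1, st2.2.1, st2.2.2 ++ [xseat.2]))
        (st.1, st.2.1, ([] : List String))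
      (inner.1, inner.2.1, st.2.2 ++ [inner.2.2]))
    ((0 : Int), false, ([] : List (List String)))
  (res.2.2, res.2.1, res.1)

-- ===== PORT B =====
-- counts = {}; for each taken seat, for each diff: counts[(x+dx, y+dy)] = counts.get(.., 0) + 1
def scatterCounts (seatmap : List (List String)) : PySem.Dict (Int × Int) Int :=
  (PySem.List.enumerate seatmap).foldl
    (fun cnt yr =>
      (PySem.List.enumerate yr.2).foldl
        (fun c2 xc =>
          if xc.2 ≠ "." ∧ xc.2 ≠ "L" then
            SEAT_DIFFS.foldl
              (fun c3 d => c3.insert (xc.1 + d.1, yr.1 + d.2) (c3.getD (xc.1 + d.1, yr.1 + d.2) 0 + 1))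
              c2
          else c2)
        cnt)
    PySem.Dict.empty

def IterateP1_alt (seatmap : List (List String)) : List (List String) × Bool × Int :=
  let counts := scatterCounts seatmap
  let newMap := (PySem.List.enumerate seatmap).map (fun yr =>
    (PySem.List.enumerate yr.2).map (fun xc =>
      if xc.2 = "L" ∧ counts.getD (xc.1, yr.1) 0 = 0 then "#"
      else if xc.2 = "#" ∧ counts.getD (xc.1, yr.1) 0 ≥ 4 then "L"
      else xc.2))
  let occupied : Int := (newMap.map (fun r => (PySem.List.count r "#" : Int))).sum
  (newMap, !(newMap == seatmap), occupied)

-- ===== PRECONDITION & SPEC =====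
def Spec_IterateP1 (seatmap : List (List String)) (out : List (List String) × Bool × Int) : Prop := out = IterateP1_alt seatmap
instance (seatmap : List (List String)) (out : List (List String) × Bool × Int) : Decidable (Spec_IterateP1 seatmap out) := by unfold Spec_IterateP1; infer_instance

-- ===== CLAIM (what is proved, stated in full; the proofs are below) =====
def Claim_equal_IterateP1 : Prop := ∀ (seatmap : List (List String)), Dom_IterateP1 seatmap → Spec_IterateP1 seatmap (IterateP1 seatmap)

-- ===== LEMMAS AND PROOFS =====

-- proof-side vocabulary: a boolean version of A's IsTaken = some true
def NeighborTaken (seatmap : List (List String)) (yy xx : Int) : Bool :=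
  decide (0 ≤ yy) && decide (yy < (seatmap.length : Int)) &&
    (decide (0 ≤ xx) && decide (xx < (((PySem.List.pyGet? seatmap yy).getD []).length : Int)) &&
      (let c := (PySem.List.pyGet? ((PySem.List.pyGet? seatmap yy).getD []) xx).getD ""
       !(c == ".") && !(c == "L")))

-- gather-form cell rule (what A computes per cell)
def cellF (smap : List (List String)) (y : Int) (xs : Int × String) : String :=
  if xs.2 = "." then xs.2
  else
    let n : Int := (SEAT_DIFFS.map
      (fun d => if NeighborTaken smap (y + d.2) (xs.1 + d.1) then (1 : Int) else 0)).sum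
    if xs.2 = "L" ∧ n = 0 then "#"
    else if xs.2 = "#" ∧ n ≥ 4 then "L"
    else xs.2

def rowF (smap : List (List String)) (yr : Int × List String) : List String :=
  (PySem.List.enumerate yr.2).map (cellF smap yr.1)

-- named copies of A's inline loop bodies
def innerF (smap : List (List String)) (y : Int)
    (st2 : Int × Bool × List String) (xseat : Int × String) : Int × Bool × List String :=
  if xseat.2 ≠ "." then
    let occupiedNeighbors := SEAT_DIFFS.foldl
      (fun acc d => if IsTaken smap (xseat.1 + d.1) (y + d.2) = some true then acc + 1 else acc)
      (0 : Int)
    if xseat.2 = "L" ∧ occupiedNeighbors = 0 then (st2.1 + 1, true, st2.2.2 ++ ["#"])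
    else if xseat.2 = "#" ∧ occupiedNeighbors ≥ 4 then (st2.1, true, st2.2.2 ++ ["L"])
    else if xseat.2 = "#" then (st2.1 + 1, st2.2.1, st2.2.2 ++ [xseat.2])
    else (st2.1, st2.2.1, st2.2.2 ++ [xseat.2])
  else (st2.1, st2.2.1, st2.2.2 ++ [xseat.2])

theorem isTaken_iff (smap : List (List String)) (x y : Int) :
    IsTaken smap x y = some true ↔ NeighborTaken smap y x = true := by
  unfold IsTaken NeighborTaken
  by_cases h : 0 ≤ y ∧ y < (smap.length : Int) ∧ 0 ≤ x ∧ x < (((PySem.List.pyGet? smap y).getD []).length : Int)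
  · rw [if_pos h]
    obtain ⟨hy0, hy1, hx0, hx1⟩ := h
    have hyb : y.toNat < smap.length := by omega
    have hy : ((y.toNat : Nat) : Int) = y := by omega
    have h1 : PySem.List.pyGet? smap y = smap[y.toNat]? := by
      conv_lhs => rw [← hy]
      rw [PySem.List.pyGet?_natCast]
    have hrow : PySem.List.pyGet? smap y = some smap[y.toNat] := by
      rw [h1, List.getElem?_eq_getElem hyb]
    simp only [hrow, Option.getD_some] at hx1 ⊢
    simp only [hy0, hy1, hx0, hx1, decide_true, Bool.true_and]
    split_ifs with h1 h2 <;> simp_all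
  · rw [if_neg h]
    simp only [Bool.and_eq_true, decide_eq_true_iff]
    constructor
    · intro hh; simp at hh
    · intro hh
      exact absurd ⟨by tauto, by tauto, by tauto, by tauto⟩ h

theorem count_fold_eq (smap : List (List String)) (x y : Int) (ds : List (Int × Int)) (acc : Int) :
    ds.foldl (fun acc d => if IsTaken smap (x + d.1) (y + d.2) = some true then acc + 1 else acc) acc
      = acc + (ds.map (fun d => if NeighborTaken smap (y + d.2) (x + d.1) then (1 : Int) else 0)).sum := by
  induction ds generalizing acc with
  | nil => simp
  | cons d ds ih =>
    simp only [List.foldl_cons, List.map_cons, List.sum_cons, ih]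
    rw [if_congr (isTaken_iff smap (x + d.1) (y + d.2)) rfl rfl]
    by_cases h : NeighborTaken smap (y + d.2) (x + d.1) <;> simp [h] <;> ring

theorem cell_step (smap : List (List String)) (y : Int) (st2 : Int × Bool × List String)
    (xseat : Int × String) :
    innerF smap y st2 xseat =
      (st2.1 + (if cellF smap y xseat = "#" then 1 else 0),
       st2.2.1 || !(cellF smap y xseat == xseat.2),
       st2.2.2 ++ [cellF smap y xseat]) := by
  unfold innerF cellF
  rw [count_fold_eq]
  simp only [zero_add]
  by_cases h1 : xseat.2 = "."
  · simp [h1]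
  · simp only [h1, if_neg, ne_eq, not_false_iff, if_true]
    set n := (SEAT_DIFFS.map (fun d => if NeighborTaken smap (y + d.2) (xseat.1 + d.1) then (1 : Int) else 0)).sum with hn
    by_cases h2 : xseat.2 = "L" ∧ n = 0
    · simp [h2]
    · simp only [h2, if_false]
      by_cases h3 : xseat.2 = "#" ∧ n ≥ 4
      · simp [h3, h3.1]
      · simp only [h3, if_false]
        by_cases h4 : xseat.2 = "#" <;> simp [h4]

theorem row_fold_eq (smap : List (List String)) (y : Int) (r : List String) (s : Int)
    (occ : Int) (ch : Bool) (row0 : List String) :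
    (PySem.List.enumerate r s).foldl (innerF smap y) (occ, ch, row0)
      = (occ + ((PySem.List.enumerate r s).map (cellF smap y)).count "#",
         ch || !((PySem.List.enumerate r s).map (cellF smap y) == r),
         row0 ++ (PySem.List.enumerate r s).map (cellF smap y)) := by
  induction r generalizing s occ ch row0 with
  | nil => simp [PySem.List.enumerate_nil]
  | cons seat rest ih =>
    rw [PySem.List.enumerate_cons]
    simp only [List.foldl_cons, List.map_cons, cell_step, ih]
    refine Prod.ext ?_ (Prod.ext ?_ ?_)
    · simp only [List.count_cons]
      push_cast
      by_cases h : cellF smap y (s, seat) = "#" <;> simp [h, beq_iff_eq] <;> ring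
    · simp only []
      simp [List.cons_beq_cons, Bool.not_and, Bool.or_assoc]
    · simp

theorem grid_fold_eq (smap : List (List String)) (rows : List (List String)) (s : Int)
    (occ : Int) (ch : Bool) (map0 : List (List String)) :
    (PySem.List.enumerate rows s).foldl
      (fun (st : Int × Bool × List (List String)) (yr : Int × List String) =>
        let inner := (PySem.List.enumerate yr.2).foldl (innerF smap yr.1) (st.1, st.2.1, ([] : List String))
        (inner.1, inner.2.1, st.2.2 ++ [inner.2.2]))
      (occ, ch, map0)
      = (occ + (((PySem.List.enumerate rows s).map (rowF smap)).map (fun r => (r.count "#" : Int))).sum,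
         ch || !((PySem.List.enumerate rows s).map (rowF smap) == rows),
         map0 ++ (PySem.List.enumerate rows s).map (rowF smap)) := by
  induction rows generalizing s occ ch map0 with
  | nil => simp [PySem.List.enumerate_nil]
  | cons r rest ih =>
    rw [PySem.List.enumerate_cons]
    simp only [List.foldl_cons, List.map_cons, List.sum_cons]
    rw [row_fold_eq]
    simp only [ih]
    refine Prod.ext ?_ (Prod.ext ?_ ?_)
    · simp [rowF]; ring
    · simp only []
      simp [rowF, List.cons_beq_cons, Bool.not_and, Bool.or_assoc]
    · simp [rowF]

-- ---------- B-side: the scatter dict counts exactly the taken neighbors ----------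

def bumpStep (x0 y0 : Int) (c : PySem.Dict (Int × Int) Int) (d : Int × Int) : PySem.Dict (Int × Int) Int :=
  c.insert (x0 + d.1, y0 + d.2) (c.getD (x0 + d.1, y0 + d.2) 0 + 1)
def hits (x0 y0 kx ky : Int) : Int :=
  (SEAT_DIFFS.map (fun d => if x0 + d.1 = kx ∧ y0 + d.2 = ky then (1 : Int) else 0)).sum

theorem diff_fold_getD (x0 y0 : Int) (c : PySem.Dict (Int × Int) Int) (kx ky : Int) :
    (SEAT_DIFFS.foldl (bumpStep x0 y0) c).getD (kx, ky) 0 = c.getD (kx, ky) 0 + hits x0 y0 kx ky := by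
  have h1 : SEAT_DIFFS.foldl (bumpStep x0 y0) c
      = (SEAT_DIFFS.map (fun d => (x0 + d.1, y0 + d.2))).foldl
          (fun c k => c.insert k (c.getD k 0 + 1)) c := by
    rw [List.foldl_map]; rfl
  rw [h1, PySem.Dict.getD_foldl_insert_add_one]
  congr 1
  have h2 : (SEAT_DIFFS.map (fun d => (x0 + d.1, y0 + d.2))).count (kx, ky)
      = SEAT_DIFFS.countP (fun d => (x0 + d.1, y0 + d.2) == (kx, ky)) := by
    rw [List.count_eq_countP, List.countP_map]; rfl
  rw [h2]
  unfold hits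
  have h3 := PySem.List.sum_map_ite_one_zero (fun d => (x0 + d.1, y0 + d.2) == (kx, ky)) SEAT_DIFFS
  rw [← h3]
  apply congrArg
  apply List.map_congr_left
  intro d _
  simp [beq_iff_eq, Prod.ext_iff]

def cellStep (y0 : Int) (c : PySem.Dict (Int × Int) Int) (xc : Int × String) : PySem.Dict (Int × Int) Int :=
  if xc.2 ≠ "." ∧ xc.2 ≠ "L" then SEAT_DIFFS.foldl (bumpStep xc.1 y0) c else c
def rowStep (c : PySem.Dict (Int × Int) Int) (yr : Int × List String) : PySem.Dict (Int × Int) Int :=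
  (PySem.List.enumerate yr.2).foldl (cellStep yr.1) c

theorem cell_fold_getD (y0 : Int) (r : List String) (s : Int) (c : PySem.Dict (Int × Int) Int) (kx ky : Int) :
    ((PySem.List.enumerate r s).foldl (cellStep y0) c).getD (kx, ky) 0
      = c.getD (kx, ky) 0
        + ((PySem.List.enumerate r s).map
            (fun xc => if xc.2 ≠ "." ∧ xc.2 ≠ "L" then hits xc.1 y0 kx ky else 0)).sum := by
  induction r generalizing s c with
  | nil => simp [PySem.List.enumerate_nil]
  | cons seat rest ih =>
    rw [PySem.List.enumerate_cons]
    simp only [List.foldl_cons, List.map_cons, List.sum_cons, ih]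
    by_cases h : seat ≠ "." ∧ seat ≠ "L"
    · simp only [cellStep]
      rw [if_pos h, if_pos h, diff_fold_getD]
      ring
    · simp only [cellStep]
      rw [if_neg h, if_neg h]
      ring

theorem grid_fold_getD (rows : List (List String)) (s : Int) (c : PySem.Dict (Int × Int) Int) (kx ky : Int) :
    ((PySem.List.enumerate rows s).foldl rowStep c).getD (kx, ky) 0
      = c.getD (kx, ky) 0
        + ((PySem.List.enumerate rows s).map
            (fun yr => ((PySem.List.enumerate yr.2).map
              (fun xc => if xc.2 ≠ "." ∧ xc.2 ≠ "L" then hits xc.1 yr.1 kx ky else 0)).sum)).sum := by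
  induction rows generalizing s c with
  | nil => simp [PySem.List.enumerate_nil]
  | cons r rest ih =>
    rw [PySem.List.enumerate_cons]
    simp only [List.foldl_cons, List.map_cons, List.sum_cons, ih]
    rw [rowStep, cell_fold_getD]
    ring

theorem sum_map_comm {α β : Type} (A : List α) (L : List β) (h : α → β → Int) :
    (A.map (fun a => (L.map (fun b => h a b)).sum)).sum
      = (L.map (fun b => (A.map (fun a => h a b)).sum)).sum := by
  induction A with
  | nil => simp
  | cons a A ih =>
    simp only [List.map_cons, List.sum_cons, ih]
    rw [← PySem.List.sum_map_add_int]

theorem row_ident (r : List String) (s q : Int) :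
    ((PySem.List.enumerate r s).map
        (fun xc => if (xc.2 ≠ "." ∧ xc.2 ≠ "L") ∧ xc.1 = q then (1 : Int) else 0)).sum
      = if 0 ≤ q - s ∧ q - s < (r.length : Int)
            ∧ ((PySem.List.pyGet? r (q - s)).getD "") ≠ "."
            ∧ ((PySem.List.pyGet? r (q - s)).getD "") ≠ "L"
        then 1 else 0 := by
  induction r generalizing s with
  | nil => simp [PySem.List.enumerate_nil]; intros; omega
  | cons seat rest ih =>
    rw [PySem.List.enumerate_cons]
    simp only [List.map_cons, List.sum_cons]
    by_cases hq : q = s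
    · subst hq
      have e0 : q - q = (0:Int) := by omega
      have hg : PySem.List.pyGet? (seat :: rest) (0:Int) = some seat := by
        simp [PySem.List.pyGet?, PySem.List.pyIdx?]
      by_cases ht : seat ≠ "." ∧ seat ≠ "L"
      · rw [if_pos ⟨ht, rfl⟩, ih, if_neg (by intro h; have := h.1; omega),
            e0, hg]
        simp only [Option.getD_some]
        rw [if_pos ⟨by omega, by simp only [List.length_cons]; push_cast; omega, ht.1, ht.2⟩]
        norm_num
      · rw [if_neg (by intro h; exact ht h.1), ih, if_neg (by intro h; have := h.1; omega),
            e0, hg]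
        simp only [Option.getD_some]
        rw [if_neg (by intro h; exact ht ⟨h.2.2.1, h.2.2.2⟩)]
        norm_num
    · rw [if_neg (by intro h; exact hq h.2.symm), zero_add, ih]
      by_cases hlt : 0 ≤ q - s
      · have h1 : 0 < q - s := by omega
        have hg : PySem.List.pyGet? (seat :: rest) (q - s) = PySem.List.pyGet? rest (q - (s+1)) := by
          have e1 : q - s = ((q - s).toNat : Int) := by omega
          have e2 : q - (s+1) = ((q - (s+1)).toNat : Int) := by omega
          rw [e1, e2, PySem.List.pyGet?_natCast, PySem.List.pyGet?_natCast]
          have e3 : (q - s).toNat = (q - (s+1)).toNat + 1 := by omega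
          rw [e3, List.getElem?_cons_succ]
        rw [hg]
        apply if_congr _ rfl rfl
        simp only [List.length_cons]
        push_cast
        constructor
        · rintro ⟨h1, h2, h3⟩; exact ⟨by omega, by omega, h3⟩
        · rintro ⟨h1, h2, h3⟩; exact ⟨by omega, by omega, h3⟩
      · rw [if_neg (by intro h; have := h.1; omega), if_neg (by intro h; have := h.1; omega)]

theorem grid_ident (V : List String → Int) (rows : List (List String)) (s p : Int) :
    ((PySem.List.enumerate rows s).map (fun yr => if yr.1 = p then V yr.2 else 0)).sum
      = if 0 ≤ p - s ∧ p - s < (rows.length : Int)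
        then V ((PySem.List.pyGet? rows (p - s)).getD []) else 0 := by
  induction rows generalizing s with
  | nil => simp [PySem.List.enumerate_nil]

  | cons r rest ih =>
    rw [PySem.List.enumerate_cons]
    simp only [List.map_cons, List.sum_cons]
    by_cases hp : p = s
    · subst hp
      have e0 : p - p = (0:Int) := by omega
      have hg : PySem.List.pyGet? (r :: rest) (0:Int) = some r := by
        simp [PySem.List.pyGet?, PySem.List.pyIdx?]
      rw [if_pos rfl, ih, if_neg (by intro h; have := h.1; omega), e0, hg]
      rw [if_pos (show ((0:Int) ≤ 0 ∧ (0:Int) < ((r :: rest).length : Int)) from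
            ⟨le_refl _, by simp only [List.length_cons]; push_cast; omega⟩)]
      simp
    · rw [if_neg (by intro h; exact hp h.symm), zero_add, ih]
      by_cases hlt : 0 ≤ p - s
      · have h1 : 0 < p - s := by omega
        have hg : PySem.List.pyGet? (r :: rest) (p - s) = PySem.List.pyGet? rest (p - (s+1)) := by
          have e1 : p - s = ((p - s).toNat : Int) := by omega
          have e2 : p - (s+1) = ((p - (s+1)).toNat : Int) := by omega
          rw [e1, e2, PySem.List.pyGet?_natCast, PySem.List.pyGet?_natCast]
          have e3 : (p - s).toNat = (p - (s+1)).toNat + 1 := by omega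
          rw [e3, List.getElem?_cons_succ]
        rw [hg]
        apply if_congr _ rfl rfl
        simp only [List.length_cons]
        push_cast
        constructor
        · rintro ⟨h1, h2⟩; exact ⟨by omega, by omega⟩
        · rintro ⟨h1, h2⟩; exact ⟨by omega, by omega⟩
      · rw [if_neg (by intro h; have := h.1; omega), if_neg (by intro h; have := h.1; omega)]

theorem NB_eval (smap : List (List String)) (yy xx : Int) :
    (if 0 ≤ yy - 0 ∧ yy - 0 < (smap.length : Int)
      then (if 0 ≤ xx - 0 ∧ xx - 0 < (((PySem.List.pyGet? smap (yy - 0)).getD []).length : Int)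
                ∧ ((PySem.List.pyGet? ((PySem.List.pyGet? smap (yy - 0)).getD []) (xx - 0)).getD "") ≠ "."
                ∧ ((PySem.List.pyGet? ((PySem.List.pyGet? smap (yy - 0)).getD []) (xx - 0)).getD "") ≠ "L"
            then (1 : Int) else 0)
      else 0)
    = if NeighborTaken smap yy xx then 1 else 0 := by
  have e : yy - 0 = yy := by omega
  have e2 : xx - 0 = xx := by omega
  rw [e, e2]
  unfold NeighborTaken
  by_cases h1 : 0 ≤ yy ∧ yy < (smap.length : Int)
  · rw [if_pos h1]
    by_cases h2 : 0 ≤ xx ∧ xx < (((PySem.List.pyGet? smap yy).getD []).length : Int)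
        ∧ ((PySem.List.pyGet? ((PySem.List.pyGet? smap yy).getD []) xx).getD "") ≠ "."
        ∧ ((PySem.List.pyGet? ((PySem.List.pyGet? smap yy).getD []) xx).getD "") ≠ "L"
    · rw [if_pos h2, if_pos]
      simp only [Bool.and_eq_true, decide_eq_true_iff, Bool.not_eq_eq_eq_not, Bool.not_true,
        beq_eq_false_iff_ne, ne_eq]
      tauto
    · rw [if_neg h2, if_neg]
      simp only [Bool.and_eq_true, decide_eq_true_iff, Bool.not_eq_eq_eq_not, Bool.not_true,
        beq_eq_false_iff_ne, ne_eq]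
      tauto
  · rw [if_neg h1, if_neg]
    simp only [Bool.and_eq_true, decide_eq_true_iff]
    tauto

theorem diffs_sym (f : Int → Int → Int) (x y : Int) :
    (SEAT_DIFFS.map (fun d => f (x - d.1) (y - d.2))).sum
      = (SEAT_DIFFS.map (fun d => f (x + d.1) (y + d.2))).sum := by
  simp only [SEAT_DIFFS, List.map_cons, List.map_nil, List.sum_cons, List.sum_nil]
  norm_num
  ring_nf

theorem scatterCounts_eq (smap : List (List String)) :
    scatterCounts smap = (PySem.List.enumerate smap).foldl rowStep PySem.Dict.empty := rfl

theorem scatter_getD (smap : List (List String)) (kx ky : Int) :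
    (scatterCounts smap).getD (kx, ky) 0
      = (SEAT_DIFFS.map (fun d => if NeighborTaken smap (ky - d.2) (kx - d.1) then (1 : Int) else 0)).sum := by
  rw [scatterCounts_eq, grid_fold_getD, PySem.Dict.getD_empty, zero_add]
  have push : ∀ (yr : Int × List String),
      ((PySem.List.enumerate yr.2).map
        (fun xc => if xc.2 ≠ "." ∧ xc.2 ≠ "L" then hits xc.1 yr.1 kx ky else 0)).sum
      = (SEAT_DIFFS.map (fun d =>
          ((PySem.List.enumerate yr.2).map
            (fun xc => if (xc.2 ≠ "." ∧ xc.2 ≠ "L") ∧ xc.1 + d.1 = kx ∧ yr.1 + d.2 = ky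
                       then (1 : Int) else 0)).sum)).sum := by
    intro yr
    rw [← sum_map_comm]
    apply congrArg
    apply List.map_congr_left
    intro xc _
    by_cases h : xc.2 ≠ "." ∧ xc.2 ≠ "L"
    · rw [if_pos h]
      unfold hits
      apply congrArg
      apply List.map_congr_left
      intro d _
      apply if_congr _ rfl rfl
      tauto
    · rw [if_neg h]
      have hz : ∀ d ∈ SEAT_DIFFS,
          (if (xc.2 ≠ "." ∧ xc.2 ≠ "L") ∧ xc.1 + d.1 = kx ∧ yr.1 + d.2 = ky then (1 : Int) else 0) = 0 := by
        intro d _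
        rw [if_neg (by tauto)]
      rw [List.map_congr_left hz]
      simp
  rw [List.map_congr_left (fun yr _ => push yr), sum_map_comm]
  apply congrArg
  apply List.map_congr_left
  intro d _
  have peel : ∀ (yr : Int × List String),
      ((PySem.List.enumerate yr.2).map
        (fun xc => if (xc.2 ≠ "." ∧ xc.2 ≠ "L") ∧ xc.1 + d.1 = kx ∧ yr.1 + d.2 = ky
                   then (1 : Int) else 0)).sum
      = (if yr.1 = ky - d.2 then
          ((PySem.List.enumerate yr.2).map
            (fun xc => if (xc.2 ≠ "." ∧ xc.2 ≠ "L") ∧ xc.1 = kx - d.1 then (1 : Int) else 0)).sum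
         else 0) := by
    intro yr
    by_cases hy : yr.1 + d.2 = ky
    · rw [if_pos (by omega)]
      apply congrArg
      apply List.map_congr_left
      intro xc _
      apply if_congr _ rfl rfl
      constructor
      · rintro ⟨a, b, _⟩; exact ⟨a, by omega⟩
      · rintro ⟨a, b⟩; exact ⟨a, by omega, hy⟩
    · rw [if_neg (by omega)]
      have hz : ∀ xc ∈ PySem.List.enumerate yr.2,
          (if (xc.2 ≠ "." ∧ xc.2 ≠ "L") ∧ xc.1 + d.1 = kx ∧ yr.1 + d.2 = ky then (1 : Int) else 0) = 0 := by
        intro xc _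
        rw [if_neg (by tauto)]
      rw [List.map_congr_left hz]
      simp
  rw [List.map_congr_left (fun yr _ => peel yr)]
  rw [grid_ident (fun r => ((PySem.List.enumerate r).map
        (fun xc => if (xc.2 ≠ "." ∧ xc.2 ≠ "L") ∧ xc.1 = kx - d.1 then (1 : Int) else 0)).sum)
      smap 0 (ky - d.2)]
  rw [← NB_eval smap (ky - d.2) (kx - d.1)]
  by_cases h1 : 0 ≤ ky - d.2 - 0 ∧ ky - d.2 - 0 < (smap.length : Int)
  · rw [if_pos h1, if_pos h1, row_ident]
  · rw [if_neg h1, if_neg h1]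

def cellB (smap : List (List String)) (y : Int) (xc : Int × String) : String :=
  if xc.2 = "L" ∧ (scatterCounts smap).getD (xc.1, y) 0 = 0 then "#"
  else if xc.2 = "#" ∧ (scatterCounts smap).getD (xc.1, y) 0 ≥ 4 then "L"
  else xc.2

theorem cellB_eq_cellF (smap : List (List String)) (y : Int) (xc : Int × String) :
    cellB smap y xc = cellF smap y xc := by
  unfold cellB cellF
  have hn : (scatterCounts smap).getD (xc.1, y) 0
      = (SEAT_DIFFS.map (fun d => if NeighborTaken smap (y + d.2) (xc.1 + d.1) then (1 : Int) else 0)).sum := by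
    rw [scatter_getD]
    exact diffs_sym (fun px py => if NeighborTaken smap py px then (1 : Int) else 0) xc.1 y
  rw [hn]
  set n := (SEAT_DIFFS.map (fun d => if NeighborTaken smap (y + d.2) (xc.1 + d.1) then (1 : Int) else 0)).sum with hdef
  by_cases h1 : xc.2 = "."
  · simp [h1]
  · rw [if_neg h1]

-- ===== VERDICT (by name: the statement is the Claim_ definition above) =====
theorem IterateP1_spec : Claim_equal_IterateP1 := by
  intro smap _
  show IterateP1 smap = IterateP1_alt smap
  have hA : IterateP1 smap =
      (let res := (PySem.List.enumerate smap).foldl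
        (fun (st : Int × Bool × List (List String)) (yr : Int × List String) =>
          let inner := (PySem.List.enumerate yr.2).foldl (innerF smap yr.1) (st.1, st.2.1, ([] : List String))
          (inner.1, inner.2.1, st.2.2 ++ [inner.2.2]))
        ((0 : Int), false, ([] : List (List String)))
      (res.2.2, res.2.1, res.1)) := rfl
  have hB : IterateP1_alt smap =
      ((PySem.List.enumerate smap).map (fun yr => (PySem.List.enumerate yr.2).map (cellB smap yr.1)),
       !((PySem.List.enumerate smap).map (fun yr => (PySem.List.enumerate yr.2).map (cellB smap yr.1)) == smap),
       (((PySem.List.enumerate smap).map (fun yr => (PySem.List.enumerate yr.2).map (cellB smap yr.1))).map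
         (fun r => (PySem.List.count r "#" : Int))).sum) := rfl
  have hNG : (PySem.List.enumerate smap).map (fun yr => (PySem.List.enumerate yr.2).map (cellB smap yr.1))
      = (PySem.List.enumerate smap).map (rowF smap) := by
    apply List.map_congr_left
    intro yr _
    unfold rowF
    apply List.map_congr_left
    intro xc _
    exact cellB_eq_cellF smap yr.1 xc
  rw [hA, hB, hNG]
  simp only [grid_fold_eq]
  simp
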